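-- pv_equiv track=rewrite | github.com/cathalgarvey/dna2way | dnahash.py | canonical_orientation_dna
-- ===== SOURCE A (Python) =====
-- def reverse_complement(seq):
--     revseq = ''.join({"A":"T","C":"G","G":"C","T":"A"}[n] for n in seq[::-1])
--     return revseq
--
-- def canonical_orientation_dna(seq, values={'A':0,'C':1,'G':2,'T':3}):
--     """
--     Take a DNA string, and calculate its reverse complement. Based on the value
--     of the initial nucleotides in either case, choose either original or complement.
--     """
--     revseq = reverse_complement(seq)
--     for n,p in enumerate(zip(seq,revseq)):
--         i,j = p
--         if n > 1+(len(seq)//2):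
--             break
--         if values[i] > values[j]:
--             return seq
--         elif values[j] > values[i]:
--             return revseq
--         else:
--             continue
--     # Palindrome
--     return seq
-- ===== SOURCE B (Python) =====
-- def reverse_complement(seq):
--     revseq = ''.join({"A":"T","C":"G","G":"C","T":"A"}[n] for n in seq[::-1])
--     return revseq
--
-- def canonical_orientation_dna(seq, values={'A':0,'C':1,'G':2,'T':3}):
--     """Canonical orientation = the lexicographically larger of seq and its
--     reverse complement (the ASCII order of the four bases coincides with the value order)."""
--     return max(seq, reverse_complement(seq))
-- ===== Notes on version B (the rewrite author's own statement) =====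
-- stated objective: simpler
-- what changed: B drops the value table and the bounded half-length comparison loop: it returns the lexicographic max of the input and its reverse complement, which equals A's choice because the ASCII order of the four nucleotide letters coincides with the value order and reverse-complement symmetry makes any first difference appear within the first half.
import Mathlib
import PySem

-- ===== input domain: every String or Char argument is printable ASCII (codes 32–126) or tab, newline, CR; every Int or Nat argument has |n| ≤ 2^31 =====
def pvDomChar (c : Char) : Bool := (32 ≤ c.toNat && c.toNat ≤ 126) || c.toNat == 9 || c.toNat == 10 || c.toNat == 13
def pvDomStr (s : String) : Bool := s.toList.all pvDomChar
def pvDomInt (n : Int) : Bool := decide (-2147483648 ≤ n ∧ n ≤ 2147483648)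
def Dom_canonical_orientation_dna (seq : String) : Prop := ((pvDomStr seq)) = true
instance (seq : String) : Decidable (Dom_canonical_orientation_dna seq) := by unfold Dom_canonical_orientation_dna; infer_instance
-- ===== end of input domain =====

-- B replaces A's value-table half-length comparison loop by a single lexicographic
-- max against the reverse complement (objective: simpler); same KeyError domain.

-- ===== PORT A =====
-- {"A":"T","C":"G","G":"C","T":"A"}[n] : none = KeyError
def pyCompGet? (c : Char) : Option Char :=
  if c = 'A' then some 'T' else if c = 'C' then some 'G'
  else if c = 'G' then some 'C' else if c = 'T' then some 'A' else none

-- reverse_complement: join of the dict lookups over seq[::-1]; none = KeyError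
def reverse_complement? (seq : List Char) : Option (List Char) :=
  seq.reverse.mapM pyCompGet?

-- values[c] for values = {'A':0,'C':1,'G':2,'T':3}; none = KeyError
def pyValGet? (c : Char) : Option Int :=
  if c = 'A' then some 0 else if c = 'C' then some 1
  else if c = 'G' then some 2 else if c = 'T' then some 3 else none

-- the for-loop over enumerate(zip(seq, revseq)): break when n > bound, then compare values
def canonLoopA (seqC revC : List Char) (bound : Nat) : List (Char × Char) → Nat → List Char
  | [], _ => seqC
  | (i, j) :: rest, n =>
    if n > bound then seqC
    else
      match pyValGet? i, pyValGet? j with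
      | some vi, some vj =>
        if vi > vj then seqC
        else if vj > vi then revC
        else canonLoopA seqC revC bound rest (n + 1)
      | _, _ => seqC   -- KeyError (never reached once reverse_complement? succeeded)

def canonical_orientation_dna (seq : String) : String :=
  let s := seq.toList
  match reverse_complement? s with
  | none => ""   -- reverse_complement raises KeyError here (excluded by Pre_)
  | some revC => String.ofList (canonLoopA s revC (1 + s.length / 2) (s.zip revC) 0)

-- ===== PORT B =====
def canonical_orientation_dna_alt (seq : String) : String :=
  match reverse_complement? seq.toList with
  | none => ""   -- reverse_complement raises KeyError here (excluded by Pre_)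
  | some revC => max seq (String.ofList revC)

-- ===== PRECONDITION & SPEC =====
-- A (and B) raise KeyError as soon as seq has a character other than the four bases A, C, G, T; exactly those inputs are excluded.
def Pre_canonical_orientation_dna (seq : String) : Prop :=
  (seq.toList.all (fun c => c == 'A' || c == 'C' || c == 'G' || c == 'T')) = true
instance (seq : String) : Decidable (Pre_canonical_orientation_dna seq) := by
  unfold Pre_canonical_orientation_dna; infer_instance
def pvWitness_canonical_orientation_dna : String := "ACCT"

def Spec_canonical_orientation_dna (seq : String) (out : String) : Prop := out = canonical_orientation_dna_alt seq
instance (seq : String) (out : String) : Decidable (Spec_canonical_orientation_dna seq out) := by unfold Spec_canonical_orientation_dna; infer_instance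

-- ===== CLAIM (what is proved, stated in full; the proofs are below) =====
def Claim_equal_canonical_orientation_dna : Prop := ∀ (seq : String), Dom_canonical_orientation_dna seq → Pre_canonical_orientation_dna seq → Spec_canonical_orientation_dna seq (canonical_orientation_dna seq)

-- ===== LEMMAS AND PROOFS =====

/-- The total reverse-complement letter map (agrees with the dict on the four bases). -/
def compT (c : Char) : Char :=
  if c = 'A' then 'T' else if c = 'C' then 'G' else if c = 'G' then 'C' else 'A'

/-- The total value map (agrees with the dict on the four bases). -/
def valT (c : Char) : Int :=
  if c = 'A' then 0 else if c = 'C' then 1 else if c = 'G' then 2 else 3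

def isACGT (c : Char) : Prop := c = 'A' ∨ c = 'C' ∨ c = 'G' ∨ c = 'T'

theorem compGet_eq {c : Char} (h : isACGT c) : pyCompGet? c = some (compT c) := by
  rcases h with h | h | h | h <;> subst h <;> decide

theorem valGet_eq {c : Char} (h : isACGT c) : pyValGet? c = some (valT c) := by
  rcases h with h | h | h | h <;> subst h <;> decide

theorem isACGT_comp {c : Char} (h : isACGT c) : isACGT (compT c) := by
  rcases h with h | h | h | h <;> subst h <;> simp [isACGT, compT]

theorem comp_comp {c : Char} (h : isACGT c) : compT (compT c) = c := by
  rcases h with h | h | h | h <;> subst h <;> decide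

theorem val_lt_iff {a b : Char} (ha : isACGT a) (hb : isACGT b) : valT a < valT b ↔ a < b := by
  rcases ha with h | h | h | h <;> subst h <;>
    rcases hb with h | h | h | h <;> subst h <;> decide

theorem val_eq_iff {a b : Char} (ha : isACGT a) (hb : isACGT b) : valT a = valT b ↔ a = b := by
  rcases ha with h | h | h | h <;> subst h <;>
    rcases hb with h | h | h | h <;> subst h <;> decide

theorem mapM_comp {l : List Char} (h : ∀ c ∈ l, isACGT c) :
    l.mapM pyCompGet? = some (l.map compT) := by
  induction l with
  | nil => rfl
  | cons a l ih =>
    have ha := h a (List.mem_cons_self ..)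
    simp [List.mapM_cons, compGet_eq ha, ih (fun c hc => h c (List.mem_cons_of_mem _ hc))]

/-- Loop characterisation: if the first differing pair (when it exists) is reached
before the break, the loop decides by that pair; otherwise it returns `seqC`. -/
theorem canonLoopA_eq (s0 r0 : List Char) (bound : Nat) :
    ∀ (pairs : List (Char × Char)) (n : Nat),
      (∀ p ∈ pairs, isACGT p.1 ∧ isACGT p.2) →
      (∀ q rest, pairs.dropWhile (fun p => p.1 == p.2) = q :: rest →
        n + (pairs.takeWhile (fun p => p.1 == p.2)).length ≤ bound) →
      canonLoopA s0 r0 bound pairs n =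
        match pairs.dropWhile (fun p => p.1 == p.2) with
        | [] => s0
        | q :: _ => if q.2 < q.1 then s0 else r0 := by
  intro pairs
  induction pairs with
  | nil => intro n _ _; simp [canonLoopA]
  | cons p rest ih =>
    intro n hACGT hbd
    obtain ⟨i, j⟩ := p
    have hij := hACGT (i, j) (List.mem_cons_self ..)
    by_cases hn : n > bound
    · rw [canonLoopA, if_pos hn]
      cases hdw : ((i, j) :: rest).dropWhile (fun p => p.1 == p.2) with
      | nil => rfl
      | cons q r' => exact absurd (hbd q r' hdw) (by omega)
    · rw [canonLoopA, if_neg hn, valGet_eq hij.1, valGet_eq hij.2]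
      simp only
      rcases lt_trichotomy (valT i) (valT j) with hv | hv | hv
      · have hne : ¬ ((i, j).1 == (i, j).2) = true := by
          simp only [beq_iff_eq]
          intro h; rw [h] at hv; exact lt_irrefl _ hv
        rw [if_neg (by omega : ¬ valT j < valT i), if_pos hv,
            List.dropWhile_cons, if_neg hne]
        have : (i, j).2 < (i, j).1 → False := fun h => by
          have := (val_lt_iff hij.2 hij.1).mpr h
          simp at this; omega
        simp only
        rw [if_neg (fun h => this h)]
      · have heq : i = j := (val_eq_iff hij.1 hij.2).mp hv
        have hpred : ((i, j).1 == (i, j).2) = true := by simp [heq]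
        rw [if_neg (by omega : ¬ valT j < valT i), if_neg (by omega : ¬ valT i < valT j)]
        rw [List.dropWhile_cons, if_pos hpred]
        apply ih
        · exact fun p hp => hACGT p (List.mem_cons_of_mem _ hp)
        · intro q r' hdw
          have := hbd q r' (by rw [List.dropWhile_cons, if_pos hpred]; exact hdw)
          rw [List.takeWhile_cons, if_pos hpred] at this
          simp at this ⊢; omega
      · have hne : ¬ ((i, j).1 == (i, j).2) = true := by
          simp only [beq_iff_eq]
          intro h; rw [h] at hv; exact lt_irrefl _ hv
        rw [if_pos hv, List.dropWhile_cons, if_neg hne]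
        have hji : (i, j).2 < (i, j).1 := (val_lt_iff hij.2 hij.1).mp hv
        simp only
        rw [if_pos hji]

/-- Agreement on the first half forces a full palindrome (reverse-complement symmetry). -/
theorem palin_of_takeWhile {s r : List Char} (hA : ∀ c ∈ s, isACGT c)
    (hr : r = (s.map compT).reverse)
    (htw : s.length / 2 + 1 ≤ ((s.zip r).takeWhile (fun p => p.1 == p.2)).length) :
    s = r := by
  have hlr : r.length = s.length := by simp [hr]
  have hzlen : (s.zip r).length = s.length := by simp [hlr]
  have hpref := List.takeWhile_prefix (l := s.zip r) (fun p => p.1 == p.2)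
  have htwlen : ((s.zip r).takeWhile (fun p => p.1 == p.2)).length ≤ s.length := by
    have := hpref.length_le; omega
  have Heq : ∀ i, i ≤ s.length / 2 → ∀ (hi : i < s.length), s[i] = r[i]'(by omega) := by
    intro i hi2 hi
    have hiw : i < ((s.zip r).takeWhile (fun p => p.1 == p.2)).length := by omega
    have h1 := hpref.getElem hiw
    have h2 : (fun (p : Char × Char) => p.1 == p.2)
        (((s.zip r).takeWhile (fun p => p.1 == p.2))[i]) = true :=
      List.mem_takeWhile_imp (p := fun (p : Char × Char) => p.1 == p.2) (List.getElem_mem hiw)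
    rw [h1] at h2
    rw [List.getElem_zip] at h2
    simpa using h2
  apply List.ext_getElem (by omega)
  intro i hi hi2
  by_cases hle : i ≤ s.length / 2
  · exact Heq i hle hi
  · have hi1 : 1 ≤ i := by omega
    have hlt : s.length - 1 - i < s.length := by omega
    have hle' : s.length - 1 - i ≤ s.length / 2 := by omega
    have egen : ∀ k, (hk : k < s.length) → r[k]'(by omega) = compT (s[s.length - 1 - k]'(by omega)) := by
      intro k hk
      have hk2 : k < (s.map compT).reverse.length := by simp; omega
      calc r[k]'(by omega) = (s.map compT).reverse[k]'(hk2) := by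
              congr 1
        _ = (s.map compT)[(s.map compT).length - 1 - k]'(by simp; omega) := List.getElem_reverse _
        _ = compT (s[s.length - 1 - k]'(by omega)) := by
              simp [List.getElem_map]
    have e1 : r[i]'(by omega) = compT (s[s.length - 1 - i]'(by omega)) := egen i hi
    have e2 : s[s.length - 1 - i]'(by omega) = r[s.length - 1 - i]'(by omega) := Heq _ hle' hlt
    have e3 : r[s.length - 1 - i]'(by omega) = compT (s[s.length - 1 - (s.length - 1 - i)]'(by omega)) := egen _ hlt
    have e4 : s.length - 1 - (s.length - 1 - i) = i := by omega
    rw [e1, e2, e3]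
    have hc : isACGT (s[i]'(hi)) := hA _ (List.getElem_mem hi)
    have : (s[s.length - 1 - (s.length - 1 - i)]'(by omega) : Char) = s[i]'(hi) := by
      congr 1
    rw [this, comp_comp hc]

/-- First differing pair of the zip decides the lexicographic order. -/
theorem lex_of_dropWhile :
    ∀ (s r : List Char), s.length = r.length →
      ∀ q rest, (s.zip r).dropWhile (fun p => p.1 == p.2) = q :: rest →
        (q.2 < q.1 → List.Lex (· < ·) r s) ∧ (¬ q.2 < q.1 → List.Lex (· < ·) s r) := by
  intro s
  induction s with
  | nil => intro r hlen q rest h; simp at h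
  | cons a s' ih =>
    intro r hlen q rest h
    cases r with
    | nil => simp at hlen
    | cons b r' =>
      simp only [List.zip_cons_cons, List.dropWhile_cons] at h
      by_cases hab : ((a, b).1 == (a, b).2) = true
      · rw [if_pos hab] at h
        have hab' : a = b := by simpa using hab
        subst hab'
        have hrec := ih r' (by simpa using hlen) q rest h
        exact ⟨fun hq => List.Lex.cons (hrec.1 hq), fun hq => List.Lex.cons (hrec.2 hq)⟩
      · rw [if_neg hab] at h
        have hq : q = (a, b) := (List.cons.inj h).1.symm
        subst hq
        have hne : a ≠ b := by simpa using hab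
        refine ⟨fun hq => List.Lex.rel hq, fun hq => ?_⟩
        · simp only at hq
          have hlt : a < b := by
            rcases lt_trichotomy a b with h1 | h1 | h1
            · exact h1
            · exact absurd h1 hne
            · exact absurd h1 hq
          exact List.Lex.rel hlt

/-- Pairs of a list zipped with itself have equal components. -/
theorem zip_self_eq {α : Type} (l : List α) : ∀ p ∈ l.zip l, p.1 = p.2 := by
  induction l with
  | nil => intro p hp; simp at hp
  | cons a l ih =>
    intro p hp
    rw [List.zip_cons_cons, List.mem_cons] at hp
    rcases hp with rfl | hp
    · rfl
    · exact ih p hp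

-- ===== VERDICT (by name: the statement is the Claim_ definition above) =====
theorem canonical_orientation_dna_spec : Claim_equal_canonical_orientation_dna := by
  intro seq _ hpre
  unfold Spec_canonical_orientation_dna
  have hA : ∀ c ∈ seq.toList, isACGT c := by
    rw [Pre_canonical_orientation_dna, List.all_eq_true] at hpre
    intro c hc
    have := hpre c hc
    unfold isACGT
    simp at this
    tauto
  have hArev : ∀ c ∈ seq.toList.reverse, isACGT c :=
    fun c hc => hA c (List.mem_reverse.mp hc)
  have hrc : reverse_complement? seq.toList = some ((seq.toList.map compT).reverse) := by
    unfold reverse_complement?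
    rw [mapM_comp hArev, List.map_reverse]
  have hAr : ∀ c ∈ (seq.toList.map compT).reverse, isACGT c := by
    intro c hc
    rw [List.mem_reverse, List.mem_map] at hc
    obtain ⟨a, ha, rfl⟩ := hc
    exact isACGT_comp (hA a ha)
  have hzA : ∀ p ∈ seq.toList.zip ((seq.toList.map compT).reverse), isACGT p.1 ∧ isACGT p.2 := by
    intro p hp
    have := List.of_mem_zip hp
    exact ⟨hA _ this.1, hAr _ this.2⟩
  have hlr : ((seq.toList.map compT).reverse).length = seq.toList.length := by simp
  have hbd : ∀ q rest, (seq.toList.zip ((seq.toList.map compT).reverse)).dropWhile (fun p => p.1 == p.2) = q :: rest →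
      0 + ((seq.toList.zip ((seq.toList.map compT).reverse)).takeWhile (fun p => p.1 == p.2)).length ≤ 1 + seq.toList.length / 2 := by
    intro q rest hdw
    by_contra hcon
    have hsr : seq.toList = (seq.toList.map compT).reverse :=
      palin_of_takeWhile hA rfl (by omega)
    have hnil : (seq.toList.zip ((seq.toList.map compT).reverse)).dropWhile (fun p => p.1 == p.2) = [] := by
      rw [List.dropWhile_eq_nil_iff]
      intro p hp
      rw [← hsr] at hp
      have := zip_self_eq seq.toList p hp
      simpa using this
    rw [hnil] at hdw
    exact absurd hdw (by simp)
  have hBeq : canonical_orientation_dna_alt seq = max seq (String.ofList ((seq.toList.map compT).reverse)) := by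
    unfold canonical_orientation_dna_alt
    rw [hrc]
  have hAeq : canonical_orientation_dna seq = String.ofList (canonLoopA seq.toList ((seq.toList.map compT).reverse) (1 + seq.toList.length / 2) (seq.toList.zip ((seq.toList.map compT).reverse)) 0) := by
    unfold canonical_orientation_dna
    simp only [hrc]
  rw [hAeq, hBeq,
    canonLoopA_eq seq.toList ((seq.toList.map compT).reverse) (1 + seq.toList.length / 2)
      (seq.toList.zip ((seq.toList.map compT).reverse)) 0 hzA hbd]
  cases hdw : (seq.toList.zip ((seq.toList.map compT).reverse)).dropWhile (fun p => p.1 == p.2) with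
  | nil =>
    have hall := List.dropWhile_eq_nil_iff.mp hdw
    have hsr : seq.toList = (seq.toList.map compT).reverse := by
      apply List.ext_getElem (by simp)
      intro i hi hi2
      have hp : (seq.toList[i], ((seq.toList.map compT).reverse)[i]'(hi2)) ∈
          seq.toList.zip ((seq.toList.map compT).reverse) := by
        rw [← List.getElem_zip (h := by simpa using hi)]
        exact List.getElem_mem _
      have := hall _ hp
      simpa using this
    simp only
    rw [← hsr, String.ofList_toList, max_self]
  | cons q rest =>
    have hlex := lex_of_dropWhile seq.toList ((seq.toList.map compT).reverse) hlr.symm q rest hdw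
    simp only
    by_cases hq : q.2 < q.1
    · rw [if_pos hq]
      have hlt : String.ofList ((seq.toList.map compT).reverse) < seq := by
        rw [String.lt_iff_toList_lt, String.toList_ofList]
        show List.lt _ _
        rw [List.lt_iff_lex_lt]
        exact hlex.1 hq
      rw [max_eq_left (le_of_lt hlt)]
      exact String.ofList_toList
    · rw [if_neg hq]
      have hlt : seq < String.ofList ((seq.toList.map compT).reverse) := by
        rw [String.lt_iff_toList_lt, String.toList_ofList]
        show List.lt _ _
        rw [List.lt_iff_lex_lt]
        exact hlex.2 hq
      rw [max_eq_right (le_of_lt hlt)]
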